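-- pv_equiv track=rewrite | github.com/rahulc0dy/Advent-of-Code-Solutions | 2024/AOC Day 25/part1.py | compute_key_heights
-- ===== SOURCE A (Python) =====
-- def compute_key_heights(block):
--     H = len(block)
--     W = len(block[0])
--     heights = []
--     for j in range(W):
--         for i in range(H):
--             if block[i][j] == "#":
--                 heights.append((H - 1) - i)
--                 break
--     return heights
-- ===== SOURCE B (Python) =====
-- def compute_key_heights(block):
--     H = len(block)
--     W = len(block[0])
--     first_row = {}
--     for i, row in enumerate(block):
--         for j, ch in enumerate(row):
--             if ch == "#" and j not in first_row:
--                 first_row[j] = i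
--     return [(H - 1) - first_row[j] for j in range(W) if j in first_row]
-- ===== Notes on version B (the rewrite author's own statement) =====
-- stated objective: alternative
-- what changed: Column-major scans with an inner break are replaced by one row-major pass that records each column's first '#' row in a dict, then emits heights in column order.
import Mathlib
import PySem

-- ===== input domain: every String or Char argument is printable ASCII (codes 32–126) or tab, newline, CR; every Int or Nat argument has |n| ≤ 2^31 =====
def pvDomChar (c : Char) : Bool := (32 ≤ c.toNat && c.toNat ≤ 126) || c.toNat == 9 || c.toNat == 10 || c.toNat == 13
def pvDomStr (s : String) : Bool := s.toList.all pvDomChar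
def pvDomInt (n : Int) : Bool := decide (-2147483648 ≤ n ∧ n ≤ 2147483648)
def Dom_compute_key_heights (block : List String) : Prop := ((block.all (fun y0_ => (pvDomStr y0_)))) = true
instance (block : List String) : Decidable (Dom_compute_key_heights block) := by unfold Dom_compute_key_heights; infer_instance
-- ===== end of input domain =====

-- B replaces A's column-major scans (inner break per column) by one row-major pass
-- recording each column's first '#' row in a dict, then emitting heights in column order
-- (objective: alternative; same asymptotic cost).


-- ===== PORT A =====
-- inner loop 'for i in range(H): if block[i][j] == "#": append((H-1)-i); break',
-- transcribed as structural recursion over the remaining rows carrying the row index i;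
-- a none from pyGet? is Python's IndexError (excluded by Pre_), the loop stops there.
def pvAInner (H j : Int) (i : Int) : List String → Option Int
  | [] => none
  | row :: rest =>
    match PySem.Str.pyGet? row j with
    | none => none
    | some c => if c = '#' then some ((H - 1) - i) else pvAInner H j (i + 1) rest

def compute_key_heights (block : List String) : List Int :=
  let H : Int := block.length
  match block with
  | [] => []          -- Python raises IndexError on block[0]; excluded by Pre_
  | r0 :: _ =>
    let W : Int := r0.length
    (PySem.List.pyRange 0 W 1).foldl (fun heights j =>
      match pvAInner H j 0 block with
      | some h => heights ++ [h]
      | none => heights) []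

-- ===== PORT B =====
-- 'for j, ch in enumerate(row): if ch == "#" and j not in first_row: first_row[j] = i'
def pvBRow (d : PySem.Dict Int Int) (i : Int) (j : Int) : List Char → PySem.Dict Int Int
  | [] => d
  | c :: cs =>
    pvBRow (if c = '#' ∧ (d.get? j).isNone then d.insert j i else d) i (j + 1) cs

-- 'for i, row in enumerate(block): …'
def pvBRows (d : PySem.Dict Int Int) (i : Int) : List String → PySem.Dict Int Int
  | [] => d
  | r :: rs => pvBRows (pvBRow d i 0 r.toList) (i + 1) rs

def compute_key_heights_alt (block : List String) : List Int :=
  let H : Int := block.length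
  match block with
  | [] => []          -- Python raises IndexError on block[0]; excluded by Pre_
  | r0 :: _ =>
    let W : Int := r0.length
    let fr := pvBRows PySem.Dict.empty 0 block
    (PySem.List.pyRange 0 W 1).foldl (fun acc j =>
      match fr.get? j with
      | some i => acc ++ [(H - 1) - i]
      | none => acc) []

-- ===== PRECONDITION & SPEC =====
-- Pre_ = exactly the inputs on which A returns: the block is nonempty, and for each
-- column j of the first row, whenever some row is too short for j, an earlier row
-- already carries '#' at j (A's scan breaks before the IndexError).
def Pre_compute_key_heights (block : List String) : Prop :=
  block ≠ [] ∧ ∀ j < block.headI.length, ∀ k < block.length,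
    (block.getD k "").length ≤ j →
      ∃ k' < k, ((block.getD k' "").toList)[j]? = some '#' 
instance (block : List String) : Decidable (Pre_compute_key_heights block) := by unfold Pre_compute_key_heights; infer_instance

def pvWitness_compute_key_heights : List String := ["#..", ".#.", "..."]

def Spec_compute_key_heights (block : List String) (out : List Int) : Prop := out = compute_key_heights_alt block
instance (block : List String) (out : List Int) : Decidable (Spec_compute_key_heights block out) := by unfold Spec_compute_key_heights; infer_instance

-- ===== CLAIM (what is proved, stated in full; the proofs are below) =====
def Claim_equal_compute_key_heights : Prop := ∀ (block : List String), Dom_compute_key_heights block → Pre_compute_key_heights block → Spec_compute_key_heights block (compute_key_heights block)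

-- ===== LEMMAS AND PROOFS =====

-- does the cell at absolute column q hold '#' in this row suffix starting at column j0?
def pvRowHas (j0 q : Int) : List Char → Bool
  | [] => false
  | c :: cs => (decide (q = j0) && decide (c = '#')) || pvRowHas (j0 + 1) q cs

-- first row index (counting from i) whose row has '#' at column q
def pvColFirst (i q : Int) : List String → Option Int
  | [] => none
  | r :: rs => if pvRowHas 0 q r.toList then some i else pvColFirst (i + 1) q rs

theorem pvRowHas_lt (cs : List Char) : ∀ j0 q : Int, q < j0 → pvRowHas j0 q cs = false := by
  induction cs with
  | nil => intro _ _ _; rfl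
  | cons c cs ih =>
    intro j0 q h
    have hq : q ≠ j0 := by omega
    simp [pvRowHas, hq, ih (j0 + 1) q (by omega)]

theorem pvRowHas_get (cs : List Char) : ∀ j0 q : Int, j0 ≤ q →
    (pvRowHas j0 q cs = true ↔ cs[(q - j0).toNat]? = some '#') := by
  induction cs with
  | nil => intro j0 q h; simp [pvRowHas]
  | cons c cs ih =>
    intro j0 q h
    by_cases hq : q = j0
    · subst hq
      simp [pvRowHas, pvRowHas_lt cs (q + 1) q (by omega)]
    · have h1 : j0 + 1 ≤ q := by omega
      have h2 : (q - j0).toNat = (q - (j0 + 1)).toNat + 1 := by omega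
      simp [pvRowHas, hq, h2, ih (j0 + 1) q h1]

theorem pvBRow_get (cs : List Char) : ∀ (d : PySem.Dict Int Int) (i j0 q : Int),
    (pvBRow d i j0 cs).get? q =
      ((d.get? q).orElse (fun _ => if pvRowHas j0 q cs then some i else none)) := by
  induction cs with
  | nil => intro d i j0 q; cases hd : d.get? q <;> simp [pvBRow, pvRowHas, hd, Option.orElse]
  | cons c cs ih =>
    intro d i j0 q
    rw [pvBRow, ih]
    by_cases hq : q = j0
    · subst hq
      rw [pvRowHas_lt cs (q + 1) q (by omega)]
      by_cases hc : c = '#'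
      · cases hd : d.get? q with
        | none =>
          simp [hc, PySem.Dict.get?_insert_self, pvRowHas, Option.orElse]
        | some v =>
          simp [hc, hd, Option.orElse]
      · cases hd : d.get? q <;>
          simp [hc, hd, pvRowHas, Option.orElse, pvRowHas_lt cs (q + 1) q (by omega)]
    · have hd' : (if c = '#' ∧ (d.get? j0).isNone then d.insert j0 i else d).get? q = d.get? q := by
        split
        · exact PySem.Dict.get?_insert_of_ne d i hq
        · rfl
      rw [hd']
      simp [pvRowHas, hq]

theorem pvBRows_get (rs : List String) : ∀ (d : PySem.Dict Int Int) (i q : Int),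
    (pvBRows d i rs).get? q = ((d.get? q).orElse (fun _ => pvColFirst i q rs)) := by
  induction rs with
  | nil => intro d i q; cases hd : d.get? q <;> simp [pvBRows, pvColFirst, hd, Option.orElse]
  | cons r rs ih =>
    intro d i q
    rw [pvBRows, ih, pvBRow_get, pvColFirst]
    cases d.get? q with
    | some v => rfl
    | none =>
      cases h : pvRowHas 0 q r.toList <;> simp [Option.orElse]

-- "A's scan of column q completes": every row reached before the first '#' is long enough
def pvOK (q : Int) : List String → Prop
  | [] => True
  | r :: rs => q < (r.length : Int) ∧ (r.toList[q.toNat]? = some '#' ∨ pvOK q rs)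

theorem pvPre_ok (q : Int) (hq0 : 0 ≤ q) :
    ∀ rows : List String,
      (∀ k < rows.length, (rows.getD k "").length ≤ q.toNat →
         ∃ k' < k, ((rows.getD k' "").toList)[q.toNat]? = some '#') →
      pvOK q rows := by
  intro rows
  induction rows with
  | nil => intro _; trivial
  | cons r rs ih =>
    intro h
    have hlen : q < (r.length : Int) := by
      by_contra hle
      obtain ⟨k', hk', _⟩ := h 0 (by simp) (by simpa using (by omega : r.length ≤ q.toNat))
      omega
    refine ⟨hlen, ?_⟩
    by_cases hc : r.toList[q.toNat]? = some '#'
    · exact Or.inl hc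
    · refine Or.inr (ih ?_)
      intro k hk hshort
      obtain ⟨k', hk'lt, hk'hash⟩ := h (k + 1) (by simpa using hk) (by simpa using hshort)
      match k', hk'lt, hk'hash with
      | 0, _, hk'hash => exact absurd (by simpa using hk'hash) hc
      | k' + 1, hk'lt, hk'hash => exact ⟨k', by omega, by simpa using hk'hash⟩

theorem pvAInner_eq (H q : Int) (hq0 : 0 ≤ q) :
    ∀ (rows : List String), pvOK q rows → ∀ i : Int,
      pvAInner H q i rows = (pvColFirst i q rows).map (fun k => (H - 1) - k) := by
  intro rows
  induction rows with
  | nil => intro _ _; rfl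
  | cons r rs ih =>
    intro hOK i
    have hlen : q.toNat < r.toList.length := by
      have := hOK.1
      rw [String.length_toList]
      omega
    have hget : PySem.Str.pyGet? r q = some (r.toList[q.toNat]) := by
      simp only [PySem.Str.pyGet?, PySem.Chars.pyGet?_eq_listPyGet?]
      rw [PySem.List.pyGet?_of_nonneg _ hq0, List.getElem?_eq_getElem hlen]
    have hrowhas : pvRowHas 0 q r.toList = true ↔ r.toList[q.toNat]? = some '#' := by
      simpa using pvRowHas_get r.toList 0 q hq0
    rw [pvAInner, hget, pvColFirst]
    by_cases hc : r.toList[q.toNat] = '#'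
    · have hh : pvRowHas 0 q r.toList = true := by
        rw [hrowhas]; simp [List.getElem?_eq_getElem hlen, hc]
      simp [hc, hh]
    · have hrs : pvOK q rs := by
        rcases hOK.2 with h' | h'
        · exact absurd (by simpa [List.getElem?_eq_getElem hlen] using h') hc
        · exact h'
      have hh : pvRowHas 0 q r.toList = false := by
        cases hb : pvRowHas 0 q r.toList
        · rfl
        · exfalso; apply hc
          have := hrowhas.mp hb
          simpa [List.getElem?_eq_getElem hlen] using this
      simp [hc, hh, ih hrs (i + 1)]

-- ===== VERDICT (by name: the statement is the Claim_ definition above) =====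
theorem compute_key_heights_spec : Claim_equal_compute_key_heights := by
  intro block _hdom hpre
  unfold Spec_compute_key_heights compute_key_heights compute_key_heights_alt
  match block, hpre with
  | [], hpre => exact absurd rfl hpre.1
  | r0 :: rs, hpre =>
    simp only
    apply PySem.List.foldl_congr_mem
    intro acc j hj
    have hjr := (PySem.List.mem_pyRange_one).mp hj
    have hok : pvOK j (r0 :: rs) := by
      apply pvPre_ok j hjr.1
      intro k hk hshort
      exact hpre.2 j.toNat (by have := hjr.2; simp only [List.headI]; omega) k hk hshort
    rw [pvAInner_eq _ j hjr.1 (r0 :: rs) hok 0, pvBRows_get]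
    simp only [PySem.Dict.get?_empty]
    cases pvColFirst 0 j (r0 :: rs) <;> rfl
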